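-- pv_equiv track=rewrite | github.com/OneFineStarstuff/OneFineStarstuff.github.io | docs/schemas/validate_artifact_inventory.py | find_duplicate_paths
-- ===== SOURCE A (Python) =====
-- def find_duplicate_paths(paths: list[str]) -> list[str]:
--     seen: set[str] = set()
--     duplicates: list[str] = []
--     for path in paths:
--         if path in seen and path not in duplicates:
--             duplicates.append(path)
--         seen.add(path)
--     return duplicates
-- ===== SOURCE B (Python) =====
-- def find_duplicate_paths(paths: list[str]) -> list[str]:
--     # A path is emitted exactly at its second occurrence, i.e. at index i
--     # where the prefix before i contains it exactly once.
--     return [p for i, p in enumerate(paths) if paths[:i].count(p) == 1]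
-- ===== Notes on version B (the rewrite author's own statement) =====
-- stated objective: simpler
-- what changed: Replaces the stateful single pass (seen-set plus duplicates-list accumulator) by a stateless one-line comprehension that keeps paths[i] exactly when the prefix paths[:i] counts it exactly once; no containers are maintained at all.
import Mathlib
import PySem

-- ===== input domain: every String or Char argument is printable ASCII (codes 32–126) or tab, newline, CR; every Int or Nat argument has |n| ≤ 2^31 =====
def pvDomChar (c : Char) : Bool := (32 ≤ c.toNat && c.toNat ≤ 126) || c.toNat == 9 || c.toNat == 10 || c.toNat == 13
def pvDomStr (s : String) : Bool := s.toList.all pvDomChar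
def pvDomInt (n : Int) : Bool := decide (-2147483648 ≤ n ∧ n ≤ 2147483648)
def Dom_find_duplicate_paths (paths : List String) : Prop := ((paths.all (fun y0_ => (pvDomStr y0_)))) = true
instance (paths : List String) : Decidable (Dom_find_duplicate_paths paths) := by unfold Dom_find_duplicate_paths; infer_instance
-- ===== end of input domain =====

-- B drops A's stateful seen-set/duplicates-list loop for a stateless comprehension keeping
-- paths[i] exactly when paths[:i] counts it exactly once (same value, simpler decomposition).

-- ===== PORT A =====
def find_duplicate_paths (paths : List String) : List String :=
  (paths.foldl (fun st path =>
      let seen := st.1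
      let duplicates := st.2
      let duplicates :=
        if seen.contains path && !(duplicates.contains path)
        then duplicates ++ [path] else duplicates
      (PySem.Set.add seen path, duplicates))
    ((PySem.Set.empty : PySem.Set String), ([] : List String))).2

-- ===== PORT B =====
def find_duplicate_paths_alt (paths : List String) : List String :=
  (PySem.List.enumerate paths).filterMap (fun ip =>
    if (PySem.List.slice paths none (some ip.1)).count ip.2 = 1 then some ip.2 else none)

-- ===== PRECONDITION & SPEC =====
def Spec_find_duplicate_paths (paths : List String) (out : List String) : Prop := out = find_duplicate_paths_alt paths
instance (paths : List String) (out : List String) : Decidable (Spec_find_duplicate_paths paths out) := by unfold Spec_find_duplicate_paths; infer_instance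

-- ===== CLAIM (what is proved, stated in full; the proofs are below) =====
def Claim_equal_find_duplicate_paths : Prop := ∀ (paths : List String), Dom_find_duplicate_paths paths → Spec_find_duplicate_paths paths (find_duplicate_paths paths)

-- ===== LEMMAS AND PROOFS =====

-- B on a snoc: the new last element is kept iff the old list counts it exactly once.
theorem alt_snoc (pre : List String) (x : String) :
    find_duplicate_paths_alt (pre ++ [x])
      = find_duplicate_paths_alt pre ++ (if pre.count x = 1 then [x] else []) := by
  unfold find_duplicate_paths_alt
  rw [PySem.List.enumerate_append, List.filterMap_append]
  congr 1
  · apply List.filterMap_congr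
    intro ip hip
    obtain ⟨k, hk, rfl⟩ := (PySem.List.mem_enumerate_iff _ _ _).1 hip
    simp only [Int.zero_add, PySem.List.slice_to_natCast, List.take_append_of_le_length (le_of_lt hk)]
  · simp only [PySem.List.enumerate_nil, PySem.List.enumerate_cons, List.filterMap]
    rw [show ((0 : Int) + pre.length) = ((pre.length : Nat) : Int) by omega]
    rw [PySem.List.slice_to_natCast, List.take_left]
    split_ifs with h <;> simp

theorem find_duplicate_paths_loop_eq :
    ∀ (rest pre : List String) (seen : PySem.Set String) (dup : List String),
    (∀ p, p ∈ seen ↔ 1 ≤ pre.count p) →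
    (∀ p, p ∈ dup ↔ 2 ≤ pre.count p) →
    dup = find_duplicate_paths_alt pre →
    (rest.foldl (fun st path =>
        let seen := st.1
        let duplicates := st.2
        let duplicates :=
          if seen.contains path && !(duplicates.contains path)
          then duplicates ++ [path] else duplicates
        (PySem.Set.add seen path, duplicates))
      (seen, dup)).2
    = find_duplicate_paths_alt (pre ++ rest) := by
  intro rest
  induction rest with
  | nil => intro pre seen dup _ _ hdup; simpa using hdup
  | cons x rest ih =>
    intro pre seen dup hseen hdup heq
    simp only [List.foldl_cons]
    have hcond : (seen.contains x && !(dup.contains x)) = decide (pre.count x = 1) := by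
      simp only [PySem.Set.contains_eq_listContains, List.contains_eq_mem, ← decide_not,
        ← Bool.decide_and, decide_eq_decide]
      rw [hseen x, hdup x]
      omega
    have hre : pre ++ x :: rest = (pre ++ [x]) ++ rest := by simp
    rw [hcond, hre]
    have hcount : ∀ p, (pre ++ [x]).count p = pre.count p + (if p = x then 1 else 0) := by
      intro p
      rw [List.count_append]
      by_cases hp : p = x
      · subst hp; simp
      · simp [hp, Ne.symm hp]
    have hcountseen : ∀ p, (p ∈ PySem.Set.add seen x) ↔ 1 ≤ (pre ++ [x]).count p := by
      intro p
      rw [PySem.Set.mem_add, hseen p, hcount p]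
      by_cases hp : p = x
      · simp [hp]
      · simp [hp]
    by_cases h : pre.count x = 1
    · simp only [h, decide_true, if_true]
      apply ih
      · exact hcountseen
      · intro p
        rw [List.mem_append, hdup p, hcount p]
        by_cases hp : p = x
        · subst hp; simp [h]
        · simp [hp]
      · rw [heq, alt_snoc, if_pos h]
    · simp only [h, decide_false, Bool.false_eq_true, if_false]
      apply ih
      · exact hcountseen
      · intro p
        rw [hdup p, hcount p]
        by_cases hp : p = x
        · subst hp; rw [if_pos rfl]; omega
        · simp [hp]
      · rw [heq, alt_snoc, if_neg h, List.append_nil]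

-- ===== VERDICT (by name: the statement is the Claim_ definition above) =====
theorem find_duplicate_paths_spec : Claim_equal_find_duplicate_paths := by
  intro paths _
  unfold Spec_find_duplicate_paths find_duplicate_paths
  rw [find_duplicate_paths_loop_eq paths [] _ _ (by intro p; simp [PySem.Set.empty]) (by intro p; simp) (by rfl)]
  simp
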